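-- pv_equiv track=rewrite | github.com/SKNETWORKS-FAMILY-AICAMP/SKN21-FINAL-5TEAM | chatbot/src/onboarding_v2/validation/flow_evaluator.py | classify_conversation_failure
-- ===== SOURCE A (Python) =====
-- def classify_conversation_failure(deterministic_failures: list[str]) -> str | None:
--     categories = (
--         "auth_gate_failed",
--         "adapter_resolution_failed",
--         "missing_required_selection_step",
--         "missing_required_option_selection_step",
--         "missing_mutation_confirmation_step",
--         "tool_expectation_failed",
--         "scenario_logic_failed",
--     )
--     for category in categories:
--         if category in deterministic_failures:
--             return category
--     if deterministic_failures:
--         return "scenario_logic_failed"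
--     return None
-- ===== SOURCE B (Python) =====
-- def classify_conversation_failure(deterministic_failures: list[str]) -> str | None:
--     categories = [
--         "auth_gate_failed",
--         "adapter_resolution_failed",
--         "missing_required_selection_step",
--         "missing_required_option_selection_step",
--         "missing_mutation_confirmation_step",
--         "tool_expectation_failed",
--         "scenario_logic_failed",
--     ]
--     prio = {c: i for i, c in enumerate(categories)}
--     best = None
--     for f in deterministic_failures:
--         i = prio.get(f)
--         if i is not None and (best is None or i < best):
--             best = i
--     if best is not None:
--         return categories[best]
--     return "scenario_logic_failed" if deterministic_failures else None
-- ===== Notes on version B (the rewrite author's own statement) =====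
-- stated objective: alternative
-- what changed: Instead of scanning the fixed category tuple and testing membership of each category in the input list (up to 7 full scans of the list), B builds a category-to-priority dict once and makes a single pass over the input list tracking the minimum priority index, then maps that index back to the category.
import Mathlib
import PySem

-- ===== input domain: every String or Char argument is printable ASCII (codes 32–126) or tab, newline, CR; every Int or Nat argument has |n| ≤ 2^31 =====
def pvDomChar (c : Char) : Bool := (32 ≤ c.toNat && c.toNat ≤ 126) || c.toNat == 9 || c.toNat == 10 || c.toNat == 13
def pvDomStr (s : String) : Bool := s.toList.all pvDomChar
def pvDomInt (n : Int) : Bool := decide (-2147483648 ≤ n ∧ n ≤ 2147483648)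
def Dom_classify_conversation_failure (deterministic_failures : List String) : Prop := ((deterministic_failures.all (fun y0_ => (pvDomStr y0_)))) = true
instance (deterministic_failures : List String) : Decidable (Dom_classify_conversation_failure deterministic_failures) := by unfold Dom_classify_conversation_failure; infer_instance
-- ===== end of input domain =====

-- B replaces A's 7 membership scans of the input (one per fixed category) by a single pass
-- over the input with a category→priority dict, tracking the minimum priority index (objective: alternative).


-- ===== PORT A =====
-- the fixed category tuple, shared literal of both programs
def pvCats : List String :=
  ["auth_gate_failed",
   "adapter_resolution_failed",
   "missing_required_selection_step",
   "missing_required_option_selection_step",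
   "missing_mutation_confirmation_step",
   "tool_expectation_failed",
   "scenario_logic_failed"]

-- A's 'for category in categories: if category in …: return category' loop with early return
def pvGoA (cs : List String) (xs : List String) : Option String :=
  match cs with
  | [] => if xs.isEmpty then none else some "scenario_logic_failed"
  | c :: rest => if c ∈ xs then some c else pvGoA rest xs

def classify_conversation_failure (deterministic_failures : List String) : Option String :=
  pvGoA pvCats deterministic_failures

-- ===== PORT B =====
-- the dict comprehension {c: i for i, c in enumerate(categories)}: its items in insertion order
def pvPrio : PySem.Dict String Nat :=
  PySem.Dict.mk
    [("auth_gate_failed", 0),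
     ("adapter_resolution_failed", 1),
     ("missing_required_selection_step", 2),
     ("missing_required_option_selection_step", 3),
     ("missing_mutation_confirmation_step", 4),
     ("tool_expectation_failed", 5),
     ("scenario_logic_failed", 6)]

-- one iteration of B's loop: i = prio.get(f); if i is not None and (best is None or i < best): best = i
def pvStep (best : Option Nat) (f : String) : Option Nat :=
  match pvPrio.get? f with
  | none => best
  | some i =>
    match best with
    | none => some i
    | some b => if i < b then some i else some b

def classify_conversation_failure_alt (deterministic_failures : List String) : Option String :=
  match deterministic_failures.foldl pvStep none with
  | some b => some (pvCats.getD b "")   -- categories[best]; best is always a valid index 0..6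
  | none => if deterministic_failures.isEmpty then none else some "scenario_logic_failed"

-- ===== PRECONDITION & SPEC =====
def Spec_classify_conversation_failure (deterministic_failures : List String) (out : Option String) : Prop := out = classify_conversation_failure_alt deterministic_failures
instance (deterministic_failures : List String) (out : Option String) : Decidable (Spec_classify_conversation_failure deterministic_failures out) := by unfold Spec_classify_conversation_failure; infer_instance

-- ===== CLAIM (what is proved, stated in full; the proofs are below) =====
def Claim_equal_classify_conversation_failure : Prop := ∀ (deterministic_failures : List String), Dom_classify_conversation_failure deterministic_failures → Spec_classify_conversation_failure deterministic_failures (classify_conversation_failure deterministic_failures)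

-- ===== LEMMAS AND PROOFS =====

-- priorities of the input, in input order
def pvP (xs : List String) : List Nat := xs.filterMap (fun f => pvPrio.get? f)

-- the dict sends categories[i] to i
theorem pvPrio_cat (i : Nat) (hi : i < 7) : pvPrio.get? (pvCats.getD i "") = some i := by
  interval_cases i <;> decide

-- inversion: a hit in the dict names a category by its index
theorem pvPrio_inv (s : String) (i : Nat) (h : pvPrio.get? s = some i) :
    i < 7 ∧ pvCats.getD i "" = s := by
  simp only [pvPrio, PySem.Dict.get?_mk_cons] at h
  split_ifs at h with h0 h1 h2 h3 h4 h5 h6 <;>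
    first
    | (simp only [Option.some.injEq] at h
       first
       | exact ⟨by omega, by rw [← h] at *; simp_all [beq_iff_eq, pvCats]⟩)
    | simp [PySem.Dict.get?] at h

theorem pv_fold_some (xs : List String) (b : Nat) :
    xs.foldl pvStep (some b) = some ((pvP xs).foldl min b) := by
  induction xs generalizing b with
  | nil => rfl
  | cons x xs ih =>
    cases hp : pvPrio.get? x with
    | none => simp [pvP, hp, pvStep, ih]
    | some i =>
      have : pvStep (some b) x = some (min b i) := by
        simp only [pvStep, hp]
        split_ifs with h <;> (congr 1; omega)
      simp [pvP, hp, List.foldl_cons, this, ih]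

theorem pv_fold_none (xs : List String) :
    xs.foldl pvStep none = (pvP xs).min? := by
  induction xs with
  | nil => rfl
  | cons x xs ih =>
    cases hp : pvPrio.get? x with
    | none => simp [pvP, hp, pvStep, ih]
    | some i =>
      simp [pvP, hp, pvStep, pv_fold_some, List.min?]

theorem pvGoA_eq (cs xs : List String) (k : Nat) (hk : k < cs.length)
    (hin : cs.getD k "" ∈ xs) (hno : ∀ j, j < k → cs.getD j "" ∉ xs) :
    pvGoA cs xs = some (cs.getD k "") := by
  induction cs generalizing k with
  | nil => simp at hk
  | cons c rest ih =>
    cases k with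
    | zero =>
      rw [List.getD_cons_zero] at hin ⊢
      simp [pvGoA, hin]
    | succ k =>
      have hc : c ∉ xs := by simpa using hno 0 (Nat.succ_pos k)
      rw [List.getD_cons_succ] at hin ⊢
      simp only [pvGoA, if_neg hc]
      exact ih k (by simpa using hk) hin
        (fun j hj => by simpa using hno (j+1) (by omega))


-- ===== VERDICT (by name: the statement is the Claim_ definition above) =====
theorem classify_conversation_failure_spec : Claim_equal_classify_conversation_failure := by
  intro xs _
  unfold Spec_classify_conversation_failure classify_conversation_failure classify_conversation_failure_alt
  rw [pv_fold_none]
  cases hm : (pvP xs).min? with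
  | none =>
    have hnil : pvP xs = [] := List.min?_eq_none_iff.mp hm
    have hno : ∀ f ∈ xs, pvPrio.get? f = none := by
      intro f hf
      have := List.filterMap_eq_nil_iff.mp hnil f hf
      exact this
    have hnc : ∀ i, i < 7 → pvCats.getD i "" ∉ xs := by
      intro i hi hmem
      have := hno _ hmem
      rw [pvPrio_cat i hi] at this
      exact Option.some_ne_none _ this
    have h0 := hnc 0 (by omega); have h1 := hnc 1 (by omega)
    have h2 := hnc 2 (by omega); have h3 := hnc 3 (by omega)
    have h4 := hnc 4 (by omega); have h5 := hnc 5 (by omega)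
    have h6 := hnc 6 (by omega)
    simp [pvCats] at h0 h1 h2 h3 h4 h5 h6
    simp [pvGoA, pvCats, h0, h1, h2, h3, h4, h5, h6]
  | some k =>
    have hspec := List.min?_eq_some_iff.mp hm
    obtain ⟨hkmem, hkmin⟩ := hspec
    obtain ⟨f, hf, hpf⟩ := List.mem_filterMap.mp hkmem
    obtain ⟨hk7, hks⟩ := pvPrio_inv f k hpf
    have hkin : pvCats.getD k "" ∈ xs := by rw [hks]; exact hf
    have hlt : ∀ j, j < k → pvCats.getD j "" ∉ xs := by
      intro j hj hmem
      have hjP : j ∈ pvP xs := List.mem_filterMap.mpr ⟨_, hmem, pvPrio_cat j (by omega)⟩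
      have := hkmin j hjP
      omega
    exact pvGoA_eq pvCats xs k (by simp [pvCats]; omega) hkin hlt
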